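-- pv_equiv track=rewrite | github.com/zzzbitz/prepbench | py2flow/operators/expr.py | _rewrite_backtick_columns
-- ===== SOURCE A (Python) =====
-- def _rewrite_backtick_columns(expr: str) -> str:
--     # Rewrite `Column Name` -> df['Column Name'].
--     # Quote-aware to avoid rewriting inside string literals.
--     out: list[str] = []
--     i = 0
--     n = len(expr)
--     quote: str | None = None
--     triple = False
--
--     while i < n:
--         ch = expr[i]
--         if quote is None:
--             if ch in ("'", '"'):
--                 if expr[i: i + 3] == ch * 3:
--                     quote = ch
--                     triple = True
--                     out.append(ch * 3)
--                     i += 3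
--                     continue
--                 quote = ch
--                 triple = False
--                 out.append(ch)
--                 i += 1
--                 continue
--             if ch == "`":
--                 j = expr.find("`", i + 1)
--                 if j == -1:
--                     out.append(ch)
--                     i += 1
--                     continue
--                 col = expr[i + 1: j]
--                 out.append(f"df[{col!r}]")
--                 i = j + 1
--                 continue
--             out.append(ch)
--             i += 1
--             continue
--
--         # inside a string literal
--         if ch == "\\" and not triple:
--             if i + 1 < n:
--                 out.append(expr[i: i + 2])
--                 i += 2
--                 continue
--         if triple:
--             if expr[i: i + 3] == quote * 3:
--                 out.append(quote * 3)
--                 i += 3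
--                 quote = None
--                 triple = False
--                 continue
--             out.append(ch)
--             i += 1
--             continue
--         if ch == quote:
--             out.append(ch)
--             i += 1
--             quote = None
--             continue
--         out.append(ch)
--         i += 1
--
--     return "".join(out)
-- ===== SOURCE B (Python) =====
-- def _rewrite_backtick_columns(expr: str) -> str:
--     # Tokenizer: copy plain runs in slices; consume whole string literals and
--     # whole backtick columns with dedicated helpers, instead of a char state machine.
--     n = len(expr)
--     parts: list[str] = []
--     i = 0
--     while i < n:
--         j = i
--         while j < n and expr[j] not in ("'", '"', '`'):
--             j += 1
--         if j > i:
--             parts.append(expr[i:j])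
--             i = j
--             continue
--         ch = expr[i]
--         if ch == '`':
--             j = expr.find('`', i + 1)
--             if j == -1:
--                 parts.append('`')
--                 i += 1
--             else:
--                 parts.append('df[' + repr(expr[i + 1: j]) + ']')
--                 i = j + 1
--         elif expr[i: i + 3] == ch * 3:
--             j = expr.find(ch * 3, i + 3)
--             if j == -1:
--                 parts.append(expr[i:])
--                 i = n
--             else:
--                 parts.append(expr[i: j + 3])
--                 i = j + 3
--         else:
--             j = i + 1
--             while j < n:
--                 c = expr[j]
--                 if c == '\\' and j + 1 < n:
--                     j += 2
--                 elif c == ch: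
--                     j += 1
--                     break
--                 else:
--                     j += 1
--             parts.append(expr[i: j])
--             i = j
--     return ''.join(parts)
-- ===== Notes on version B (the rewrite author's own statement) =====
-- stated objective: alternative
-- what changed: Replaces A's char-by-char quote/triple state machine with a tokenizer that consumes a whole token per outer step: plain runs are copied as slices, single/double/triple-quoted string literals and backtick columns are each consumed by a dedicated scan, so no quote/triple state is carried between iterations.
import Mathlib
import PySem

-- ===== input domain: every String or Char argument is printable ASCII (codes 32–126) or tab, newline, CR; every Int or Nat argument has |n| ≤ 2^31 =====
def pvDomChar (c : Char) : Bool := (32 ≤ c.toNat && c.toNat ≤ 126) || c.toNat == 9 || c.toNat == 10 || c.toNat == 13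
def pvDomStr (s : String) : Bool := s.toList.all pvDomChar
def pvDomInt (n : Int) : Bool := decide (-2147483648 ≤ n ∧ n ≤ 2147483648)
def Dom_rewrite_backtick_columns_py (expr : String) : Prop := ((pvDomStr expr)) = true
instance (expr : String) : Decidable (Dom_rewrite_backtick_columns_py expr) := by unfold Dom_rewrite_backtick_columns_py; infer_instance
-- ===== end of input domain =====

-- B rewrites A's char-by-char quote/triple state machine as a tokenizer that consumes
-- whole plain runs, whole string literals and whole backtick columns per step (objective: alternative).

-- ===== PORT A =====
-- shared helper: Python's repr(s) for a str; exact on Dom (printable ASCII + tab/newline/CR)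
def pyReprQ (cs : List Char) : Char :=
  if '\'' ∈ cs ∧ ¬ ('"' ∈ cs) then '"' else '\''

def pyReprEsc (q c : Char) : List Char :=
  if c = '\\' ∨ c = q then ['\\', c]
  else if c = '\n' then ['\\', 'n']
  else if c = '\r' then ['\\', 'r']
  else if c = '\t' then ['\\', 't']
  else [c]

def pyRepr (cs : List Char) : List Char :=
  pyReprQ cs :: cs.flatMap (pyReprEsc (pyReprQ cs)) ++ [pyReprQ cs]

-- A's while loop: index i becomes the remaining list, state (quote, triple) carried along
def goA : List Char → Option Char → Bool → List Char
  | [], _, _ => []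
  | c :: rest, none, _ =>
    if c = '\'' ∨ c = '"' then
      if rest.take 2 = [c, c] then
        c :: c :: c :: goA (rest.drop 2) (some c) true
      else
        c :: goA rest (some c) false
    else if c = '`' then
      let pre := rest.takeWhile (fun d => d ≠ '`')
      if pre.length = rest.length then
        c :: goA rest none false
      else
        ['d', 'f', '['] ++ pyRepr pre ++ [']'] ++ goA (rest.drop (pre.length + 1)) none false
    else
      c :: goA rest none false
  | c :: rest, some q, triple =>
    if c = '\\' ∧ triple = false ∧ rest ≠ [] then
      c :: rest.head! :: goA rest.tail (some q) triple
    else if triple = true then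
      if c = q ∧ rest.take 2 = [q, q] then
        q :: q :: q :: goA (rest.drop 2) none false
      else
        c :: goA rest (some q) triple
    else if c = q then
      c :: goA rest none false
    else
      c :: goA rest (some q) triple
  termination_by l _ _ => l.length
  decreasing_by all_goals (simp_all; try omega)

def rewrite_backtick_columns_py (expr : String) : String :=
  String.ofList (goA expr.toList none false)

-- ===== PORT B =====
def isSpecial (c : Char) : Bool := c == '\'' || c == '"' || c == '`'

-- Source B's inner single/double-quoted-string scan: (consumed chars, rest)
def consumeStr (q : Char) : List Char → List Char × List Char
  | [] => ([], [])
  | c :: rest =>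
    if c = '\\' then
      match rest with
      | d :: rest' => (c :: d :: (consumeStr q rest').1, (consumeStr q rest').2)
      | [] => ([c], [])
    else if c = q then ([c], rest)
    else (c :: (consumeStr q rest).1, (consumeStr q rest).2)

-- Source B's expr.find(ch*3, i+3): some (chars before the closing triple, chars after it)
def findSub3 (q : Char) : List Char → Option (List Char × List Char)
  | [] => none
  | c :: rest =>
    if c = q ∧ rest.take 2 = [q, q] then some ([], rest.drop 2)
    else
      match findSub3 q rest with
      | some (pre, post) => some (c :: pre, post)
      | none => none

-- termination facts the port cites
theorem consumeStr_snd_le (q : Char) (l : List Char) : (consumeStr q l).2.length ≤ l.length := by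
  fun_induction consumeStr q l <;> simp_all <;> omega

theorem findSub3_post_le (q : Char) (l : List Char) (pre post : List Char)
    (h : findSub3 q l = some (pre, post)) : post.length ≤ l.length := by
  fun_induction findSub3 q l generalizing pre post <;> simp_all
  · obtain ⟨-, h2⟩ := h; subst h2; simp; omega
  · omega

-- Source B's outer while loop: one token per step
def goB : List Char → List Char
  | [] => []
  | c :: rest =>
    if isSpecial c = false then
      (c :: rest.takeWhile (fun d => !isSpecial d)) ++
        goB (rest.dropWhile (fun d => !isSpecial d))
    else if c = '`' then
      let pre := rest.takeWhile (fun d => d ≠ '`')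
      if pre.length = rest.length then
        c :: goB rest
      else
        ['d', 'f', '['] ++ pyRepr pre ++ [']'] ++ goB (rest.drop (pre.length + 1))
    else if rest.take 2 = [c, c] then
      match h : findSub3 c (rest.drop 2) with
      | none => c :: rest
      | some (pre, post) => c :: c :: c :: pre ++ c :: c :: c :: goB post
    else
      c :: (consumeStr c rest).1 ++ goB (consumeStr c rest).2
  termination_by l => l.length
  decreasing_by
    · have := List.length_dropWhile_le (fun d => !isSpecial d) rest
      simp; try omega
    · simp
    · simp; try omega
    · have := findSub3_post_le c (rest.drop 2) pre post h
      simp at this; simp; try omega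
    · have := consumeStr_snd_le c rest
      simp; try omega

def rewrite_backtick_columns_py_alt (expr : String) : String :=
  String.ofList (goB expr.toList)

-- ===== PRECONDITION & SPEC =====
def Spec_rewrite_backtick_columns_py (expr : String) (out : String) : Prop := out = rewrite_backtick_columns_py_alt expr
instance (expr : String) (out : String) : Decidable (Spec_rewrite_backtick_columns_py expr out) := by unfold Spec_rewrite_backtick_columns_py; infer_instance

-- ===== CLAIM (what is proved, stated in full; the proofs are below) =====
def Claim_equal_rewrite_backtick_columns_py : Prop := ∀ (expr : String), Dom_rewrite_backtick_columns_py expr → Spec_rewrite_backtick_columns_py expr (rewrite_backtick_columns_py expr)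

-- ===== LEMMAS AND PROOFS =====
-- A in the non-triple-string state = B's consumeStr, then back to the base state
theorem goA_str (q : Char) (l : List Char) :
    goA l (some q) false = (consumeStr q l).1 ++ goA (consumeStr q l).2 none false := by
  fun_induction consumeStr q l <;> simp_all [goA]

-- A in the triple-string state = B's findSub3, then back to the base state
theorem goA_triple (q : Char) (l : List Char) :
    goA l (some q) true =
      match findSub3 q l with
      | none => l
      | some (pre, post) => pre ++ q :: q :: q :: goA post none false := by
  fun_induction findSub3 q l <;> simp_all [goA]

-- A copies a run of non-special chars through unchanged
theorem goA_run (pre rest : List Char) (h : ∀ c ∈ pre, isSpecial c = false) :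
    goA (pre ++ rest) none false = pre ++ goA rest none false := by
  induction pre with
  | nil => simp
  | cons c tl ih =>
    have hc := h c (by simp)
    have h1 : ¬ (c = '\'' ∨ c = '"') := by
      simp [isSpecial] at hc; simp; tauto
    have h2 : ¬ c = '`' := by simp [isSpecial] at hc; tauto
    simp only [List.cons_append]
    rw [goA] ; simp [h1, h2]
    exact ih (fun d hd => h d (by simp [hd]))

theorem goA_eq_goB (l : List Char) : goA l none false = goB l := by
  fun_induction goB l
  case case1 => simp [goA]
  case case2 c rest hns ih =>
    have hmem : ∀ d ∈ c :: rest.takeWhile (fun d => !isSpecial d), isSpecial d = false := by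
      intro d hd
      rcases List.mem_cons.1 hd with h | h
      · subst h; exact hns
      · simpa using List.mem_takeWhile_imp h
    have hrun := goA_run (c :: rest.takeWhile (fun d => !isSpecial d))
      (rest.dropWhile (fun d => !isSpecial d)) hmem
    simp only [List.cons_append, List.takeWhile_append_dropWhile] at hrun
    rw [hrun, ih]; simp
  case case3 rest pre hlen hns ih =>
    simp only [pre] at hlen
    try simp at hlen
    rw [goA]; simp [hlen, ih]
  case case4 rest pre hlen hns ih =>
    have hpre : (List.takeWhile (fun d => decide (d ≠ '`')) rest) =
        (List.takeWhile (fun d => !decide (d = '`')) rest) := by simp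
    try simp only [pre] at hlen
    try simp only [pre] at ih
    try simp only [pre] at ⊢
    try simp only [hpre] at hlen
    try simp only [hpre] at ih
    try simp only [hpre]
    try simp at hlen
    rw [goA]; simp [hlen, ih]
  case case5 c rest hns hnb htake hfind =>
    have hq : c = '\'' ∨ c = '"' := by
      simp [isSpecial] at hns; tauto
    rw [goA]
    rcases hq with hq | hq <;> subst hq <;> simp [htake] <;>
      rw [goA_triple] <;> simp [hfind] <;>
      (conv_rhs => rw [← List.take_append_drop 2 rest]) <;> rw [htake] <;> simp
  case case6 c rest hns hnb htake pre post hfind ih =>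
    have hq : c = '\'' ∨ c = '"' := by
      simp [isSpecial] at hns; tauto
    rw [goA]
    rcases hq with hq | hq <;> subst hq <;> simp [htake] <;>
      rw [goA_triple] <;> simp [hfind, ih]
  case case7 c rest hns hnb htake ih =>
    have hq : c = '\'' ∨ c = '"' := by
      simp [isSpecial] at hns; tauto
    rw [goA]
    rcases hq with hq | hq <;> subst hq <;> simp [htake] <;>
      rw [goA_str] <;> simp [ih]

-- ===== VERDICT (by name: the statement is the Claim_ definition above) =====
theorem rewrite_backtick_columns_py_spec : Claim_equal_rewrite_backtick_columns_py := by
  intro expr _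
  unfold Spec_rewrite_backtick_columns_py rewrite_backtick_columns_py rewrite_backtick_columns_py_alt
  rw [goA_eq_goB]
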